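-- pv_equiv track=rewrite | github.com/edouardmulliez/adventofcode | 2017/d06/d06.py | get_step_nb
-- ===== SOURCE A (Python) =====
-- def get_next_state(state):
--     state = list(state) # copy list
--     pos = state.index(max(state))
--     remaining = state[pos]
--     state[pos] = 0
--
--     while (remaining > 0):
--         pos = (pos+1)%len(state)
--         state[pos] += 1
--         remaining -= 1
--
--     return state
--
-- def get_step_nb(state):
--     step = 0
--     l = []
--     while state not in l:
--         l.append(state)
--         state = get_next_state(state)
--         step += 1
--     return step
-- ===== SOURCE B (Python) =====
-- def get_step_nb(state):
--     n = len(state)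
--     seen = set()
--     cur = tuple(state)
--     step = 0
--     while cur not in seen:
--         seen.add(cur)
--         banks = list(cur)
--         pos = banks.index(max(banks))
--         remaining = banks[pos]
--         banks[pos] = 0
--         if remaining > 0:
--             q, r = divmod(remaining, n)
--             banks = [b + q for b in banks]
--             for k in range(1, r + 1):
--                 banks[(pos + k) % n] += 1
--         cur = tuple(banks)
--         step += 1
--     return step
-- ===== Notes on version B (the rewrite author's own statement) =====
-- stated objective: alternative
-- what changed: The one-block-at-a-time redistribution while-loop is replaced by a divmod closed form (add the quotient to every bank, +1 to the first remainder positions after pos), inlined into the cycle loop, and the list of seen states is replaced by a hash set of tuples; per redistribution this does O(n) work instead of O(blocks).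
import Mathlib
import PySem

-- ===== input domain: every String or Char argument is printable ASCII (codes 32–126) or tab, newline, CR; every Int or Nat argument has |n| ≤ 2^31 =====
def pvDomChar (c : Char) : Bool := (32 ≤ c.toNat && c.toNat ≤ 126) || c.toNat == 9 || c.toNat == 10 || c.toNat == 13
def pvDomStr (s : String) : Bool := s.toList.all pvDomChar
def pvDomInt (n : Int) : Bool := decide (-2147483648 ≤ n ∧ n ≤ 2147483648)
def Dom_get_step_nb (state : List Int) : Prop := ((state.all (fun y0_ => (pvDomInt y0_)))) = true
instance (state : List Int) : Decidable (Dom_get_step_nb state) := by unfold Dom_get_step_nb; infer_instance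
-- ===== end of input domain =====

-- B redistributes blocks with a divmod closed form instead of one block at a time and
-- tracks already-seen states in a set instead of a list.

-- shared totality guard for the outer while-loops: a generous upper bound on the number of
-- distinct reachable states (fuel only; the equivalence proof holds for every fuel value)
def pvFuel (state : List Int) : Nat :=
  ((state.length + 1) * (state.foldl (fun acc x => acc + x.natAbs) 1) + 2) ^ (state.length + 1) + 2

-- ===== PORT A =====
def pvDistLoop (fuel : Nat) (remaining : Int) (pos : Nat) (st : List Int) : List Int :=
  match fuel with
  | 0 => st
  | f + 1 =>
    if remaining > 0 then
      let pos' := (pos + 1) % st.length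
      pvDistLoop f (remaining - 1) pos' (st.set pos' (st.getD pos' 0 + 1))
    else st

def get_next_state (state : List Int) : List Int :=
  match PySem.List.max? state (fun x => x) with
  | none => state          -- max([]) raises ValueError; outside Pre_
  | some m =>
    match PySem.List.index? state m with
    | none => state        -- unreachable: the max is an element
    | some pos =>
      let remaining := state.getD pos 0      -- pos < length: in range
      let st := state.set pos 0
      pvDistLoop remaining.toNat remaining pos st

def pvCycleLoopA (fuel : Nat) (l : List (List Int)) (state : List Int) (step : Int) : Int :=
  match fuel with
  | 0 => step
  | f + 1 =>
    if state ∈ l then step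
    else pvCycleLoopA f (l ++ [state]) (get_next_state state) (step + 1)

def get_step_nb (state : List Int) : Int := pvCycleLoopA (pvFuel state) [] state 0

-- ===== PORT B =====
def pvNextAlt (cur : List Int) : List Int :=
  match PySem.List.max? cur (fun x => x) with
  | none => cur            -- max([]) raises ValueError; outside Pre_
  | some m =>
    match PySem.List.index? cur m with
    | none => cur          -- unreachable: the max is an element
    | some pos =>
      let n : Int := cur.length
      let remaining := cur.getD pos 0
      let banks := cur.set pos 0
      if remaining > 0 then
        let q := PySem.Int.floordiv remaining n
        let r := PySem.Int.mod remaining n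
        let banks := banks.map (· + q)
        (PySem.List.pyRange 1 (r + 1) 1).foldl
          (fun bs k =>
            let i := PySem.Int.mod ((pos : Int) + k) n
            PySem.List.pySetD bs i (PySem.List.pyGetD bs i 0 + 1)) banks
      else banks

def pvCycleLoopB (fuel : Nat) (seen : PySem.Set (List Int)) (cur : List Int) (step : Int) : Int :=
  match fuel with
  | 0 => step
  | f + 1 =>
    if cur ∈ seen then step
    else pvCycleLoopB f (PySem.Set.add seen cur) (pvNextAlt cur) (step + 1)

def get_step_nb_alt (state : List Int) : Int :=
  pvCycleLoopB (pvFuel state) PySem.Set.empty state 0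

-- ===== PRECONDITION & SPEC =====
-- Pre_ excludes only the empty list, on which Python A raises ValueError (max of empty sequence).
def Pre_get_step_nb (state : List Int) : Prop := state ≠ []
instance (state : List Int) : Decidable (Pre_get_step_nb state) := by unfold Pre_get_step_nb; infer_instance

def pvWitness_get_step_nb : List Int := [0, 2, 7, 0]

def Spec_get_step_nb (state : List Int) (out : Int) : Prop := out = get_step_nb_alt state
instance (state : List Int) (out : Int) : Decidable (Spec_get_step_nb state out) := by unfold Spec_get_step_nb; infer_instance

-- ===== CLAIM (what is proved, stated in full; the proofs are below) =====
def Claim_equal_get_step_nb : Prop := ∀ (state : List Int), Dom_get_step_nb state → Pre_get_step_nb state → Spec_get_step_nb state (get_step_nb state)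

-- ===== LEMMAS AND PROOFS =====

-- a single "+= 1" bump at (already reduced) index j
def pvBump (bs : List Int) (j : Nat) : List Int := bs.set j (bs.getD j 0 + 1)

theorem pvBump_length (bs : List Int) (j : Nat) : (pvBump bs j).length = bs.length := by
  simp [pvBump]

theorem foldl_pvBump_length (js : List Nat) (st : List Int) :
    (js.foldl pvBump st).length = st.length := by
  induction js generalizing st with
  | nil => rfl
  | cons j js ih => simp [List.foldl_cons, ih, pvBump_length]

theorem getD_pvBump (bs : List Int) (j i : Nat) (hi : i < bs.length) :
    (pvBump bs j).getD i 0 = bs.getD i 0 + (if j = i then 1 else 0) := by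
  unfold pvBump
  by_cases h : j = i
  · subst h
    simp [hi]
  · simp [hi, h]

theorem foldl_pvBump_getD (js : List Nat) (st : List Int) (i : Nat) (hi : i < st.length) :
    (js.foldl pvBump st).getD i 0 = st.getD i 0 + (js.count i : Int) := by
  induction js generalizing st with
  | nil => simp
  | cons j js ih =>
    have hi' : i < (pvBump st j).length := by rw [pvBump_length]; exact hi
    rw [List.foldl_cons, ih _ hi', getD_pvBump st j i hi]
    by_cases h : j = i
    · simp [h]
      ring
    · simp [h]

theorem pv_count_shift_mod (n a i : Nat) (hn : 0 < n) (hi : i < n) :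
    ((List.range n).map (fun k => (a + k) % n)).count i = 1 := by
  have hnd : ((List.range n).map (fun k => (a + k) % n)).Nodup := by
    refine List.Nodup.map_on ?_ (List.nodup_range)
    intro x hx y hy hxy
    simp only [List.mem_range] at hx hy
    have hmc : x % n = y % n := Nat.ModEq.add_left_cancel' a hxy
    rwa [Nat.mod_eq_of_lt hx, Nat.mod_eq_of_lt hy] at hmc
  have hb : a % n < n := Nat.mod_lt _ hn
  have hmem : i ∈ (List.range n).map (fun k => (a + k) % n) := by
    simp only [List.mem_map, List.mem_range]
    refine ⟨(n - a % n + i) % n, Nat.mod_lt _ hn, ?_⟩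
    calc (a + (n - a % n + i) % n) % n
        = (a + (n - a % n + i)) % n := by rw [Nat.add_mod_mod]
      _ = (a % n + (n - a % n + i)) % n := by rw [Nat.mod_add_mod]
      _ = (n + i) % n := by congr 1; omega
      _ = i % n := Nat.add_mod_left n i
      _ = i := Nat.mod_eq_of_lt hi
  exact List.count_eq_one_of_mem hnd hmem

-- one full block of n consecutive bumps adds 1 to every bank
theorem pv_block_bumps (n a : Nat) (st : List Int) (hn : 0 < n) (hst : st.length = n) :
    (List.range n).foldl (fun bs k => pvBump bs ((a + k) % n)) st = st.map (· + 1) := by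
  have hfold : (List.range n).foldl (fun bs k => pvBump bs ((a + k) % n)) st
      = ((List.range n).map (fun k => (a + k) % n)).foldl pvBump st := by
    rw [List.foldl_map]
  rw [hfold]
  apply List.ext_getElem
  · rw [foldl_pvBump_length, List.length_map]
  · intro i h1 h2
    have hi : i < st.length := by rwa [foldl_pvBump_length] at h1
    have hin : i < n := hst ▸ hi
    have := foldl_pvBump_getD ((List.range n).map (fun k => (a + k) % n)) st i hi
    rw [pv_count_shift_mod n a i hn hin] at this
    have hL : (((List.range n).map (fun k => (a + k) % n)).foldl pvBump st)[i] =
        (((List.range n).map (fun k => (a + k) % n)).foldl pvBump st).getD i 0 :=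
      (List.getD_eq_getElem _ 0 h1).symm
    rw [hL, this, List.getElem_map, List.getD_eq_getElem _ 0 hi]
    simp

-- A's distribution while-loop, as a fold of bumps at consecutive (mod n) indices
theorem pvDistLoop_eq_fold (n : Nat) :
    ∀ (t : Nat) (pos : Nat) (st : List Int), st.length = n →
    pvDistLoop t (t : Int) pos st
      = (List.range t).foldl (fun bs k => pvBump bs ((pos + 1 + k) % n)) st := by
  intro t
  induction t with
  | zero => intro pos st _; rfl
  | succ t ih =>
    intro pos st hst
    have hc : ((t : Int) + 1) > 0 := by positivity
    have harg : ((t + 1 : Nat) : Int) = (t : Int) + 1 := by push_cast; ring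
    rw [pvDistLoop, harg, if_pos hc]
    have hsub : (t : Int) + 1 - 1 = (t : Int) := by ring
    rw [hsub]
    have hlen : (st.set ((pos + 1) % st.length) (st.getD ((pos + 1) % st.length) 0 + 1)).length = n := by
      simp [hst]
    rw [ih ((pos + 1) % st.length) _ hlen]
    rw [List.range_succ_eq_map, List.foldl_cons, List.foldl_map]
    have hbase : (st.set ((pos + 1) % st.length) (st.getD ((pos + 1) % st.length) 0 + 1))
        = pvBump st ((pos + 1 + 0) % n) := by
      simp [pvBump, hst]
    rw [hbase]
    congr 1
    funext bs k
    have hix : ((pos + 1) % st.length + 1 + k) % n = (pos + 1 + k.succ) % n := by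
      rw [hst]
      calc ((pos + 1) % n + 1 + k) % n = ((pos + 1) % n + (1 + k)) % n := by ring_nf
        _ = ((pos + 1) + (1 + k)) % n := Nat.mod_add_mod _ _ _
        _ = (pos + 1 + k.succ) % n := by congr 1; omega
    rw [hix]

-- q full blocks of n bumps add q to every bank
theorem pv_blocks (n a : Nat) (hn : 0 < n) :
    ∀ (q : Nat) (st : List Int), st.length = n →
    (List.range (q * n)).foldl (fun bs k => pvBump bs ((a + k) % n)) st
      = st.map (· + (q : Int)) := by
  intro q
  induction q with
  | zero => intro st _; simp
  | succ q ih =>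
    intro st hst
    have hmul : (q + 1) * n = q * n + n := by ring
    rw [hmul, List.range_add, List.foldl_append, ih st hst, List.foldl_map]
    have hidx : (fun (bs : List Int) (k : Nat) => pvBump bs ((a + (q * n + k)) % n))
        = fun bs k => pvBump bs ((a + k) % n) := by
      funext bs k
      congr 1
      calc (a + (q * n + k)) % n = ((a + k) + q * n) % n := by ring_nf
        _ = (a + k) % n := Nat.add_mul_mod_self_right _ _ _
    rw [hidx, pv_block_bumps n a _ hn (by simp [hst])]
    rw [List.map_map]
    congr 1
    funext x
    simp only [Function.comp_apply]
    push_cast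
    ring

-- the two next-state computations agree on every list
theorem pvNext_eq (s : List Int) : get_next_state s = pvNextAlt s := by
  unfold get_next_state pvNextAlt
  cases hmax : PySem.List.max? s (fun x => x) with
  | none => rfl
  | some m =>
    dsimp only []
    cases hidx : PySem.List.index? s m with
    | none => rfl
    | some pos =>
      dsimp only []
      obtain ⟨hpos, -, -⟩ := PySem.List.getElem_of_index?_eq_some hidx
      have hn0 : 0 < s.length := Nat.lt_of_le_of_lt (Nat.zero_le _) hpos
      have hstlen : (s.set pos 0).length = s.length := by simp
      by_cases hrem : s.getD pos 0 > 0
      · rw [if_pos hrem]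
        -- A side: the while loop as a fold over range t
        have htn : ((s.getD pos 0).toNat : Int) = s.getD pos 0 :=
          Int.toNat_of_nonneg (le_of_lt hrem)
        conv_lhs => rw [← htn]
        rw [Int.toNat_natCast]
        rw [pvDistLoop_eq_fold s.length _ pos _ hstlen]
        -- divmod facts
        have hnpos : (0 : Int) < (s.length : Int) := by exact_mod_cast hn0
        have hqr := PySem.Int.floordiv_mul_add_mod (s.getD pos 0) (s.length : Int)
        have hr0 : 0 ≤ PySem.Int.mod (s.getD pos 0) (s.length : Int) :=
          PySem.Int.mod_nonneg _ hnpos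
        have hrn : PySem.Int.mod (s.getD pos 0) (s.length : Int) < (s.length : Int) :=
          PySem.Int.mod_lt _ hnpos
        set q := PySem.Int.floordiv (s.getD pos 0) (s.length : Int) with hqdef
        set r := PySem.Int.mod (s.getD pos 0) (s.length : Int) with hrdef
        have hq0 : 0 ≤ q := by nlinarith
        have ht : (s.getD pos 0).toNat = q.toNat * s.length + r.toNat := by
          have hcast : s.getD pos 0 = ((q.toNat * s.length + r.toNat : Nat) : Int) := by
            push_cast
            rw [Int.toNat_of_nonneg hq0, Int.toNat_of_nonneg hr0]
            exact hqr.symm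
          rw [hcast, Int.toNat_natCast]
        rw [ht, List.range_add, List.foldl_append,
          pv_blocks s.length (pos + 1) hn0 q.toNat _ hstlen, List.foldl_map]
        -- skip the q full blocks in the indices of the remainder fold
        have hskip : (fun (bs : List Int) (k : Nat) =>
              pvBump bs ((pos + 1 + (q.toNat * s.length + k)) % s.length))
            = fun bs k => pvBump bs ((pos + 1 + k) % s.length) := by
          funext bs k
          congr 1
          calc (pos + 1 + (q.toNat * s.length + k)) % s.length
              = ((pos + 1 + k) + q.toNat * s.length) % s.length := by ring_nf
            _ = (pos + 1 + k) % s.length := Nat.add_mul_mod_self_right _ _ _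
        rw [hskip]
        -- B side: the pyRange fold is the same remainder fold
        rw [PySem.List.pyRange_one, List.foldl_map]
        have hb : (r + 1 - (1 : Int)).toNat = r.toNat := by omega
        rw [hb]
        have hqcast : (q.toNat : Int) = q := Int.toNat_of_nonneg hq0
        rw [hqcast]
        congr 1
        funext bs k
        rw [show (pos : Int) + (1 + (k : Int)) = ((pos + 1 + k : Nat) : Int) by push_cast; ring,
          PySem.Int.mod_natCast, PySem.List.pySetD_natCast, PySem.List.pyGetD_natCast, pvBump]
      · rw [if_neg hrem]
        have ht0 : (s.getD pos 0).toNat = 0 := by omega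
        rw [ht0]
        rfl

-- the two cycle-detection loops agree whenever list and set hold the same states
theorem pvCycle_eq :
    ∀ (fuel : Nat) (l : List (List Int)) (seen : PySem.Set (List Int)) (s : List Int) (step : Int),
    (∀ x, x ∈ l ↔ x ∈ seen) → pvCycleLoopA fuel l s step = pvCycleLoopB fuel seen s step := by
  intro fuel
  induction fuel with
  | zero => intros; rfl
  | succ f ih =>
    intro l seen s step hmem
    rw [pvCycleLoopA, pvCycleLoopB]
    by_cases h : s ∈ l
    · rw [if_pos h, if_pos ((hmem s).mp h)]
    · have h2 : s ∉ seen := fun hs => h ((hmem s).mpr hs)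
      rw [if_neg h, if_neg h2, pvNext_eq]
      apply ih
      intro x
      have hadd : PySem.Set.add seen s = seen ++ [s] := by
        simp [PySem.Set.add, PySem.Set.contains, h2]
      rw [hadd]
      simp only [List.mem_append, List.mem_singleton, hmem x]

-- ===== VERDICT (by name: the statement is the Claim_ definition above) =====
theorem get_step_nb_spec : Claim_equal_get_step_nb := by
  intro state _ _
  unfold Spec_get_step_nb get_step_nb get_step_nb_alt
  exact pvCycle_eq (pvFuel state) [] PySem.Set.empty state 0 (by intro x; simp [PySem.Set.empty])
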